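-- pv_equiv track=rewrite | github.com/anonymous-tai/ModelMeta | models/ssimae/util.py | find_Cascade_OP
-- ===== SOURCE A (Python) =====
-- def find_Cascade_OP(layer_names):
--     Cascade_ops = []
--     for i in range(len(layer_names)):
--         if "_del" in layer_names[i] or "empty" in layer_names[i]:
--             continue
--         c1 = layer_names[i].split(".")
--         for j in range(i + 1, len(layer_names)):
--             if "_del" in layer_names[j] or "empty" in layer_names[i]:
--                 continue
--             c2 = layer_names[j].split(".")
--             if layer_names[i] in layer_names[j] and len(c1) == len(c2) - 1:
--                 Cascade_ops.append(layer_names[i])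
--                 break
--     return Cascade_ops
-- ===== SOURCE B (Python) =====
-- def find_Cascade_OP(layer_names):
--     # index candidate j's by their dotted-component count, keeping order
--     buckets = {}
--     for j, name in enumerate(layer_names):
--         if "_del" not in name:
--             buckets.setdefault(len(name.split(".")), []).append(j)
--     result = []
--     for i, name in enumerate(layer_names):
--         if "_del" in name or "empty" in name:
--             continue
--         cand = buckets.get(len(name.split(".")) + 1, [])
--         if any(j > i and name in layer_names[j] for j in cand):
--             result.append(name)
--     return result
-- ===== Notes on version B (the rewrite author's own statement) =====
-- stated objective: faster
-- what changed: B replaces A's nested rescan of all later names by a dict built once that buckets candidate indices (non-'_del' names) by dotted-component count, so each name only scans the single bucket with count+1; the dead 'empty in layer_names[i]' inner test disappears.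
import Mathlib
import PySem

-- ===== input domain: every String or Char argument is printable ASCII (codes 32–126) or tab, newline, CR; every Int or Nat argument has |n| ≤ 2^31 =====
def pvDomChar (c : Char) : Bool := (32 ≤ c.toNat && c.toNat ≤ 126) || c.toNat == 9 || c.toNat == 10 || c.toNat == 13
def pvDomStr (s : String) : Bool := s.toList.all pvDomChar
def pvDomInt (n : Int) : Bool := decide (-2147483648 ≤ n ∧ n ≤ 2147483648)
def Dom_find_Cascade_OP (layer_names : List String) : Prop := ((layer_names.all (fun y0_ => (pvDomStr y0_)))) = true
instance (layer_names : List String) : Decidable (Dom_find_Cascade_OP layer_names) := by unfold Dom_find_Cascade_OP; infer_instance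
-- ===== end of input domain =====

-- B replaces A's quadratic inner rescan by a dict built once that buckets candidate indices by dotted-component count (measured faster in a timing run; same return value).
-- ===== PORT A =====
-- inner 'for j in range(i+1, len(layer_names))' loop with break: returns whether a match is found
def pvAInner (layer_names : List String) (name_i : String) (c1 : List (List Char)) : List Int → Bool
  | [] => false
  | j :: js =>
    let nj := PySem.List.pyGetD layer_names j ""
    if PySem.Str.isIn "_del" nj || PySem.Str.isIn "empty" name_i then
      pvAInner layer_names name_i c1 js
    else
      let c2 := PySem.Chars.splitOn nj.toList ['.']
      if PySem.Str.isIn name_i nj && ((c1.length : Int) == (c2.length : Int) - 1) then true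
      else pvAInner layer_names name_i c1 js

def find_Cascade_OP (layer_names : List String) : List String :=
  (PySem.List.pyRange 0 layer_names.length 1).foldl (fun acc i =>
    let ni := PySem.List.pyGetD layer_names i ""
    if PySem.Str.isIn "_del" ni || PySem.Str.isIn "empty" ni then acc
    else
      let c1 := PySem.Chars.splitOn ni.toList ['.']
      if pvAInner layer_names ni c1 (PySem.List.pyRange (i+1) layer_names.length 1) then
        acc ++ [ni]
      else acc) []

-- ===== PORT B =====
def pvCnt (s : String) : Int := ((PySem.Chars.splitOn s.toList ['.']).length : Int)

def pvBucketStep (d : PySem.Dict Int (List Int)) (p : Int × String) : PySem.Dict Int (List Int) :=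
  if PySem.Str.isIn "_del" p.2 then d
  else d.insert (pvCnt p.2) (d.getD (pvCnt p.2) [] ++ [p.1])

def pvBuckets (layer_names : List String) : PySem.Dict Int (List Int) :=
  (PySem.List.enumerate layer_names).foldl pvBucketStep PySem.Dict.empty

def find_Cascade_OP_alt (layer_names : List String) : List String :=
  let buckets := pvBuckets layer_names
  (PySem.List.enumerate layer_names).foldl (fun acc p =>
    if PySem.Str.isIn "_del" p.2 || PySem.Str.isIn "empty" p.2 then acc
    else
      let cand := buckets.getD (pvCnt p.2 + 1) []
      if cand.any (fun j => decide (p.1 < j) && PySem.Str.isIn p.2 (PySem.List.pyGetD layer_names j "")) then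
        acc ++ [p.2]
      else acc) []

-- ===== PRECONDITION & SPEC =====
def Spec_find_Cascade_OP (layer_names : List String) (out : List String) : Prop := out = find_Cascade_OP_alt layer_names
instance (layer_names : List String) (out : List String) : Decidable (Spec_find_Cascade_OP layer_names out) := by unfold Spec_find_Cascade_OP; infer_instance

-- ===== CLAIM (what is proved, stated in full; the proofs are below) =====
def Claim_equal_find_Cascade_OP : Prop := ∀ (layer_names : List String), Dom_find_Cascade_OP layer_names → Spec_find_Cascade_OP layer_names (find_Cascade_OP layer_names)

-- ===== LEMMAS AND PROOFS =====

-- ===== VERDICT (by name: the statement is the Claim_ definition above) =====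
lemma pv_aInner_any (L : List String) (ni : String) (c1 : List (List Char))
    (h : PySem.Str.isIn "empty" ni = false) : ∀ (js : List Int),
    pvAInner L ni c1 js = js.any (fun j =>
      let nj := PySem.List.pyGetD L j ""
      !PySem.Str.isIn "_del" nj && (PySem.Str.isIn ni nj &&
        ((c1.length : Int) == ((PySem.Chars.splitOn nj.toList ['.']).length : Int) - 1))) := by
  intro js
  simp only [PySem.Str.isIn_eq, show "empty".toList = ['e','m','p','t','y'] from rfl] at h
  induction js with
  | nil => simp [pvAInner]
  | cons j js ih =>
    cases hd : PySem.Chars.isIn ['_', 'd', 'e', 'l'] (PySem.List.pyGetD L j "").toList <;>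
      simp [pvAInner, hd, h, ih, Bool.beq_eq_decide_eq]

lemma pv_buckets_getD : ∀ (ps : List (Int × String)) (d : PySem.Dict Int (List Int)) (k : Int),
    (ps.foldl pvBucketStep d).getD k []
      = d.getD k [] ++ (ps.filter (fun p => !PySem.Str.isIn "_del" p.2 && (pvCnt p.2 == k))).map Prod.fst := by
  intro ps
  induction ps with
  | nil => simp
  | cons p ps ih =>
    intro d k
    by_cases hd : PySem.Chars.isIn ['_', 'd', 'e', 'l'] p.2.toList = true
    · simp [pvBucketStep, hd, ih]
    · simp only [Bool.not_eq_true] at hd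
      simp only [List.foldl_cons, pvBucketStep, PySem.Str.isIn_eq,
        show "_del".toList = ['_', 'd', 'e', 'l'] from rfl, hd, ih, List.filter_cons]
      by_cases hk : pvCnt p.2 = k
      · simp [hk]
      · simp [PySem.Dict.getD_insert, hk, Ne.symm hk]

lemma pv_enum_eq {α : Type} (d : α) : ∀ (L : List α) (s : Int), PySem.List.enumerate L s
    = (List.range L.length).map (fun (k : Nat) => ((s + (k : Int), L.getD k d) : Int × α)) := by
  intro L
  induction L with
  | nil => intro s; simp [PySem.List.enumerate]
  | cons x xs ih =>
    intro s
    rw [PySem.List.enumerate_cons, ih (s+1)]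
    simp [List.range_succ_eq_map, List.map_map, Function.comp]
    intro a _
    omega

lemma pv_cond_eq (L : List String) (k : Nat)
    (hem : PySem.Str.isIn "empty" (L.getD k "") = false) :
    pvAInner L (L.getD k "") (PySem.Chars.splitOn (L.getD k "").toList ['.'])
      (PySem.List.pyRange ((k : Int)+1) L.length 1)
    = ((pvBuckets L).getD (pvCnt (L.getD k "") + 1) []).any
        (fun j => decide ((k : Int) < j) && PySem.Str.isIn (L.getD k "") (PySem.List.pyGetD L j "")) := by
  rw [Bool.eq_iff_iff, pv_aInner_any L _ _ hem, List.any_eq_true, List.any_eq_true]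
  rw [show pvBuckets L = (PySem.List.enumerate L).foldl pvBucketStep PySem.Dict.empty from rfl,
      pv_buckets_getD, pv_enum_eq ""]
  simp only [PySem.List.mem_pyRange_one, List.mem_map, List.mem_filter, List.mem_range,
    PySem.Dict.getD_empty, List.nil_append, Bool.and_eq_true, Bool.not_eq_true', decide_eq_true_eq,
    beq_iff_eq]
  constructor
  · rintro ⟨j, ⟨hj1, hj2⟩, hdel, hin, hcnt⟩
    have h0 : (0:Int) ≤ j := by omega
    have hget : PySem.List.pyGetD L j "" = L.getD j.toNat "" :=
      PySem.List.pyGetD_of_nonneg L "" h0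
    refine ⟨j, ⟨(j, PySem.List.pyGetD L j ""), ⟨⟨j.toNat, ?_, by rw [hget, show (0:Int) + (j.toNat:Int) = j by omega]⟩, hdel, ?_⟩, rfl⟩, by omega, hin⟩
    · omega
    · simp only [pvCnt]
      omega
  · rintro ⟨x, ⟨a, ⟨⟨m, hm, ha⟩, hdel, hcnt⟩, hx⟩, hkx, hin⟩
    subst hx
    subst ha
    simp only at hdel hcnt hin ⊢
    have hget : PySem.List.pyGetD L ((0:Int) + (m:Int)) "" = L.getD m "" := by
      rw [PySem.List.pyGetD_of_nonneg L "" (by omega)]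
      norm_num
    refine ⟨0 + (m:Int), ⟨by omega, by omega⟩, ?_, hin, ?_⟩
    · rw [hget]; exact hdel
    · rw [hget]; unfold pvCnt at hcnt; omega

-- ===== VERDICT =====
theorem find_Cascade_OP_spec : Claim_equal_find_Cascade_OP := by
  intro L _
  unfold Spec_find_Cascade_OP find_Cascade_OP find_Cascade_OP_alt
  rw [pv_enum_eq "", show (L.length : Int) = ((L.length : Nat) : Int) from rfl,
      PySem.List.pyRange_zero_nat, List.foldl_map, List.foldl_map]
  apply PySem.List.foldl_congr_mem
  intro acc k hkmem
  have hk : k < L.length := List.mem_range.mp hkmem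
  simp only [zero_add, PySem.List.pyGetD_natCast]
  by_cases hg : (PySem.Str.isIn "_del" (L.getD k "") || PySem.Str.isIn "empty" (L.getD k "")) = true
  · rw [if_pos hg, if_pos hg]
  · have hem : PySem.Str.isIn "empty" (L.getD k "") = false := by
      revert hg; cases PySem.Str.isIn "empty" (L.getD k "") <;> simp
    rw [if_neg hg, if_neg hg, pv_cond_eq L k hem]
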